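-- pv_equiv track=rewrite | github.com/Empreiteiro/langflow-factory | components/whatsapp_and_others/whatsapp_evolution.py | update_build_config
-- ===== SOURCE A (Python) =====
-- def update_build_config(build_config, field_value, field_name=None):
--     """Update the build configuration based on selected action"""
--     if field_name != "action":
--         return build_config
--
--     # Extract action name from the selected action
--     selected = [action["name"] for action in field_value] if isinstance(field_value, list) else []
--
--     # Field mapping for each action
--     field_map = {
--         "Send Text Message": ["number", "text", "quoted_message_id", "delay", "mentions_everyone", "mentioned", "link_preview", "show_typing", "typing_delay"],
--         "Send Media": ["number", "media_url", "media_type", "media_caption", "filename", "quoted_message_id", "delay", "show_typing", "typing_delay"],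
--         "Send Audio": ["number", "audio_url", "audio_ptt", "quoted_message_id", "delay", "show_typing", "typing_delay"],
--         "Send Location": ["number", "latitude", "longitude", "location_name", "address", "quoted_message_id", "delay", "show_typing", "typing_delay"],
--         "Send List": ["number", "list_title", "list_description", "button_text", "footer_text", "list_items", "quoted_message_id", "delay"],
--         "Send Poll": ["number", "poll_name", "poll_options", "selectable_count", "quoted_message_id", "delay"],
--         "Send Sticker": ["number", "sticker_url", "quoted_message_id", "delay", "show_typing", "typing_delay"],
--         "Send Status": ["status_type", "status_content", "status_background_color", "status_caption"],
--         "Send Reaction": ["message_id", "emoji", "number"],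
--         "Find Contacts": ["remote_jid"],
--         "Find Chats": [],
--         "Find Messages": ["remote_jid"],
--         "Check Phone": ["numbers_to_check"],
--     }
--
--     # Hide all dynamic fields first
--     all_dynamic_fields = [
--         "number", "text", "media_url", "media_type", "media_caption", "filename", "audio_url", "audio_ptt",
--         "latitude", "longitude", "location_name", "address", "list_title", "list_description", "button_text",
--         "footer_text", "list_items", "poll_name", "poll_options", "selectable_count", "sticker_url",
--         "status_type", "status_content", "status_background_color", "status_caption", "message_id", "emoji",
--         "remote_jid", "numbers_to_check", "quoted_message_id", "delay", "mentions_everyone", "mentioned",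
--         "link_preview", "show_typing", "typing_delay"
--     ]
--
--     for field_name in all_dynamic_fields:
--         if field_name in build_config:
--             build_config[field_name]["show"] = False
--
--     # Show fields based on selected action
--     if len(selected) == 1 and selected[0] in field_map:
--         for field_name in field_map[selected[0]]:
--             if field_name in build_config:
--                 build_config[field_name]["show"] = True
--
--     return build_config
-- ===== SOURCE B (Python) =====
-- def update_build_config(build_config, field_value, field_name=None):
--     """Update the build configuration based on selected action.
--
--     Instead of hiding every dynamic field and then re-showing the selected
--     action's fields (two staged passes over the field tables), we keep the
--     static action->fields mapping INVERTED: for each dynamic field, the list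
--     of actions that show it.  One pass over build_config then sets each
--     dynamic field's visibility to "is the selected action among its actions".
--     (Like the original, mutates build_config in place and returns it.)
--     """
--     if field_name != "action":
--         return build_config
--
--     selected = [action["name"] for action in field_value] if isinstance(field_value, list) else []
--     act = selected[0] if len(selected) == 1 else None
--
--     # shown_by: dynamic field -> actions whose UI shows it (the action->fields
--     # table of the original, inverted; its keys are exactly the dynamic fields).
--     send_msg = ["Send Text Message", "Send Media", "Send Audio", "Send Location",
--                 "Send List", "Send Poll", "Send Sticker"]
--     typed = ["Send Text Message", "Send Media", "Send Audio", "Send Location", "Send Sticker"]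
--     shown_by = {
--         "number": send_msg + ["Send Reaction"],
--         "text": ["Send Text Message"],
--         "media_url": ["Send Media"],
--         "media_type": ["Send Media"],
--         "media_caption": ["Send Media"],
--         "filename": ["Send Media"],
--         "audio_url": ["Send Audio"],
--         "audio_ptt": ["Send Audio"],
--         "latitude": ["Send Location"],
--         "longitude": ["Send Location"],
--         "location_name": ["Send Location"],
--         "address": ["Send Location"],
--         "list_title": ["Send List"],
--         "list_description": ["Send List"],
--         "button_text": ["Send List"],
--         "footer_text": ["Send List"],
--         "list_items": ["Send List"],
--         "poll_name": ["Send Poll"],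
--         "poll_options": ["Send Poll"],
--         "selectable_count": ["Send Poll"],
--         "sticker_url": ["Send Sticker"],
--         "status_type": ["Send Status"],
--         "status_content": ["Send Status"],
--         "status_background_color": ["Send Status"],
--         "status_caption": ["Send Status"],
--         "message_id": ["Send Reaction"],
--         "emoji": ["Send Reaction"],
--         "remote_jid": ["Find Contacts", "Find Messages"],
--         "numbers_to_check": ["Check Phone"],
--         "quoted_message_id": send_msg,
--         "delay": send_msg,
--         "mentions_everyone": ["Send Text Message"],
--         "mentioned": ["Send Text Message"],
--         "link_preview": ["Send Text Message"],
--         "show_typing": typed,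
--         "typing_delay": typed,
--     }
--
--     for key, cfg in build_config.items():
--         if key in shown_by:
--             cfg["show"] = act in shown_by[key]
--
--     return build_config
-- ===== Notes on version B (the rewrite author's own statement) =====
-- stated objective: alternative
-- what changed: B inverts the static action->fields table into a field->actions index and makes one pass over build_config setting each dynamic field's visibility to 'selected action is among its actions', instead of A's two staged passes (hide every dynamic field, then re-show the selected action's fields) that probe build_config per table entry.
import Mathlib
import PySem

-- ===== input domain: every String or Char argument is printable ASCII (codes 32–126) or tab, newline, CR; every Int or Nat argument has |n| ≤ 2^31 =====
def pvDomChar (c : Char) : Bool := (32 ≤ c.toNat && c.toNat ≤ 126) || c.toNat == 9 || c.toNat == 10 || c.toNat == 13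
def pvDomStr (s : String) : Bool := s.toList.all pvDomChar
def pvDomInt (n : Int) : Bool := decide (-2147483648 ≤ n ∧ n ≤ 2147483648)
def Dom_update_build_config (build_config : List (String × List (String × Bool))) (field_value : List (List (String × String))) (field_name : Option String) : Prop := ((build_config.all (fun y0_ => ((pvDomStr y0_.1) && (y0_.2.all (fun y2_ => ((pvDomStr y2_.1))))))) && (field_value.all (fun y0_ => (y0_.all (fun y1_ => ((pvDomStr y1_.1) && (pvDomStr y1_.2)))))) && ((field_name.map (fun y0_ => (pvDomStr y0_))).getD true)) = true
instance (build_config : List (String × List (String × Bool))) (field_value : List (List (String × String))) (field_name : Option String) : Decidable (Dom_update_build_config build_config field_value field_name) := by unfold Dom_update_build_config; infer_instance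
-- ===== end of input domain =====

-- B inverts A's static action->fields table into a field->actions index and makes one pass over
-- build_config (objective: alternative); the proved equivalence is about the RETURN value — the
-- Python A and B both mutate build_config in place in the same way.

-- ===== PORT A =====
-- dict[k]["show"] = b on an insertion-ordered association dict: overwrite the first "show"
-- occurrence in place, else append (shared by both ports).
def pvInsShow (inner : List (String × Bool)) (b : Bool) : List (String × Bool) :=
  match inner with
  | [] => [("show", b)]
  | (k, v) :: rest => if k = "show" then (k, b) :: rest else (k, v) :: pvInsShow rest b

def pvModAt (bc : List (String × List (String × Bool))) (f : String) (b : Bool) :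
    List (String × List (String × Bool)) :=
  match bc with
  | [] => []
  | (k, v) :: rest => if k = f then (k, pvInsShow v b) :: rest else (k, v) :: pvModAt rest f b

def pvFieldMap : List (String × List String) :=
  [("Send Text Message", ["number","text","quoted_message_id","delay","mentions_everyone","mentioned","link_preview","show_typing","typing_delay"]),
   ("Send Media", ["number","media_url","media_type","media_caption","filename","quoted_message_id","delay","show_typing","typing_delay"]),
   ("Send Audio", ["number","audio_url","audio_ptt","quoted_message_id","delay","show_typing","typing_delay"]),
   ("Send Location", ["number","latitude","longitude","location_name","address","quoted_message_id","delay","show_typing","typing_delay"]),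
   ("Send List", ["number","list_title","list_description","button_text","footer_text","list_items","quoted_message_id","delay"]),
   ("Send Poll", ["number","poll_name","poll_options","selectable_count","quoted_message_id","delay"]),
   ("Send Sticker", ["number","sticker_url","quoted_message_id","delay","show_typing","typing_delay"]),
   ("Send Status", ["status_type","status_content","status_background_color","status_caption"]),
   ("Send Reaction", ["message_id","emoji","number"]),
   ("Find Contacts", ["remote_jid"]),
   ("Find Chats", []),
   ("Find Messages", ["remote_jid"]),
   ("Check Phone", ["numbers_to_check"])]

def pvAllDyn : List String :=
  ["number","text","media_url","media_type","media_caption","filename","audio_url","audio_ptt",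
   "latitude","longitude","location_name","address","list_title","list_description","button_text",
   "footer_text","list_items","poll_name","poll_options","selectable_count","sticker_url",
   "status_type","status_content","status_background_color","status_caption","message_id","emoji",
   "remote_jid","numbers_to_check","quoted_message_id","delay","mentions_everyone","mentioned",
   "link_preview","show_typing","typing_delay"]

-- action["name"]: first-match dict lookup; the KeyError case (no "name" key) is excluded by Pre_.
def update_build_config (build_config : List (String × List (String × Bool))) (field_value : List (List (String × String))) (field_name : Option String) : List (String × List (String × Bool)) :=
  if field_name ≠ some "action" then build_config
  else
    let selected := field_value.map (fun a => (List.lookup "name" a).getD "")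
    let bc1 := pvAllDyn.foldl
      (fun acc f => if acc.any (fun kv => kv.1 == f) then pvModAt acc f false else acc) build_config
    if selected.length = 1 ∧ (List.lookup (selected.headD "") pvFieldMap).isSome then
      ((List.lookup (selected.headD "") pvFieldMap).getD []).foldl
        (fun acc f => if acc.any (fun kv => kv.1 == f) then pvModAt acc f true else acc) bc1
    else bc1

-- ===== PORT B =====
-- Source B's hardcoded inverted index shown_by: dynamic field -> actions whose UI shows it.
def pvSendMsg : List String :=
  ["Send Text Message", "Send Media", "Send Audio", "Send Location",
   "Send List", "Send Poll", "Send Sticker"]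
def pvTyped : List String :=
  ["Send Text Message", "Send Media", "Send Audio", "Send Location", "Send Sticker"]
def pvShownBy : List (String × List String) :=
  [("number", pvSendMsg ++ ["Send Reaction"]),
   ("text", ["Send Text Message"]),
   ("media_url", ["Send Media"]),
   ("media_type", ["Send Media"]),
   ("media_caption", ["Send Media"]),
   ("filename", ["Send Media"]),
   ("audio_url", ["Send Audio"]),
   ("audio_ptt", ["Send Audio"]),
   ("latitude", ["Send Location"]),
   ("longitude", ["Send Location"]),
   ("location_name", ["Send Location"]),
   ("address", ["Send Location"]),
   ("list_title", ["Send List"]),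
   ("list_description", ["Send List"]),
   ("button_text", ["Send List"]),
   ("footer_text", ["Send List"]),
   ("list_items", ["Send List"]),
   ("poll_name", ["Send Poll"]),
   ("poll_options", ["Send Poll"]),
   ("selectable_count", ["Send Poll"]),
   ("sticker_url", ["Send Sticker"]),
   ("status_type", ["Send Status"]),
   ("status_content", ["Send Status"]),
   ("status_background_color", ["Send Status"]),
   ("status_caption", ["Send Status"]),
   ("message_id", ["Send Reaction"]),
   ("emoji", ["Send Reaction"]),
   ("remote_jid", ["Find Contacts", "Find Messages"]),
   ("numbers_to_check", ["Check Phone"]),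
   ("quoted_message_id", pvSendMsg),
   ("delay", pvSendMsg),
   ("mentions_everyone", ["Send Text Message"]),
   ("mentioned", ["Send Text Message"]),
   ("link_preview", ["Send Text Message"]),
   ("show_typing", pvTyped),
   ("typing_delay", pvTyped)]

-- 'act in shown_by[key]' with act : Option String (None when len(selected) ≠ 1)
def pvActIn (act : Option String) (acts : List String) : Bool :=
  match act with
  | some a => acts.contains a
  | none => false

def update_build_config_alt (build_config : List (String × List (String × Bool))) (field_value : List (List (String × String))) (field_name : Option String) : List (String × List (String × Bool)) :=
  if field_name ≠ some "action" then build_config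
  else
    let selected := field_value.map (fun a => (List.lookup "name" a).getD "")
    let act : Option String := if selected.length = 1 then some (selected.headD "") else none
    build_config.map (fun kv =>
      match List.lookup kv.1 pvShownBy with
      | some acts => (kv.1, pvInsShow kv.2 (pvActIn act acts))
      | none => kv)

-- ===== PRECONDITION & SPEC =====
-- Pre_ requires every association list passed for a Python dict to have distinct keys (a list with
-- duplicate keys represents no Python dict, so A's first-match behaviour there is accidental), and,
-- when field_name = "action", every field_value entry to carry a "name" key — A raises KeyError
-- otherwise.
def Pre_update_build_config (build_config : List (String × List (String × Bool))) (field_value : List (List (String × String))) (field_name : Option String) : Prop :=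
  (build_config.map Prod.fst).Nodup ∧
  (∀ p ∈ build_config, (p.2.map Prod.fst).Nodup) ∧
  (∀ a ∈ field_value, (a.map Prod.fst).Nodup) ∧
  (field_name = some "action" → ∀ a ∈ field_value, (List.lookup "name" a).isSome)

instance (build_config : List (String × List (String × Bool))) (field_value : List (List (String × String))) (field_name : Option String) : Decidable (Pre_update_build_config build_config field_value field_name) := by unfold Pre_update_build_config; infer_instance

def pvWitness_update_build_config : (List (String × List (String × Bool))) × (List (List (String × String))) × Option String :=
  ([("number", [("show", true)]), ("emoji", [("show", false)]), ("text", [])],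
   [[("name", "Send Reaction")]], some "action")

def Spec_update_build_config (build_config : List (String × List (String × Bool))) (field_value : List (List (String × String))) (field_name : Option String) (out : List (String × List (String × Bool))) : Prop := out = update_build_config_alt build_config field_value field_name
instance (build_config : List (String × List (String × Bool))) (field_value : List (List (String × String))) (field_name : Option String) (out : List (String × List (String × Bool))) : Decidable (Spec_update_build_config build_config field_value field_name out) := by unfold Spec_update_build_config; infer_instance

-- ===== CLAIM (what is proved, stated in full; the proofs are below) =====
def Claim_equal_update_build_config : Prop := ∀ (build_config : List (String × List (String × Bool))) (field_value : List (List (String × String))) (field_name : Option String), Dom_update_build_config build_config field_value field_name → Pre_update_build_config build_config field_value field_name → Spec_update_build_config build_config field_value field_name (update_build_config build_config field_value field_name)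

-- ===== LEMMAS AND PROOFS =====

-- what one A-loop iteration does to one entry
def pvReplF (f : String) (b : Bool) (kv : String × List (String × Bool)) : String × List (String × Bool) :=
  if kv.1 = f then (kv.1, pvInsShow kv.2 b) else kv

lemma pvInsShow_insShow (v : List (String × Bool)) (b c : Bool) :
    pvInsShow (pvInsShow v b) c = pvInsShow v c := by
  induction v with
  | nil => simp [pvInsShow]
  | cons hd tl ih =>
    obtain ⟨k, w⟩ := hd
    by_cases hk : k = "show" <;> simp [pvInsShow, hk, ih]

lemma pvReplF_fst (f : String) (b : Bool) (kv : String × List (String × Bool)) :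
    (pvReplF f b kv).1 = kv.1 := by
  unfold pvReplF; split <;> rfl

lemma map_pvReplF_of_not_mem {bc : List (String × List (String × Bool))} {f : String} {b : Bool}
    (h : ∀ kv ∈ bc, kv.1 ≠ f) : bc.map (pvReplF f b) = bc := by
  calc bc.map (pvReplF f b) = bc.map id := by
        apply List.map_congr_left
        intro kv hkv
        simp [pvReplF, h kv hkv]
    _ = bc := List.map_id bc

lemma pvModAt_eq_map {bc : List (String × List (String × Bool))} (f : String) (b : Bool)
    (h : (bc.map Prod.fst).Nodup) : pvModAt bc f b = bc.map (pvReplF f b) := by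
  induction bc with
  | nil => rfl
  | cons hd tl ih =>
    obtain ⟨k, v⟩ := hd
    simp only [List.map_cons, List.nodup_cons] at h
    by_cases hk : k = f
    · subst hk
      have htl : tl.map (pvReplF k b) = tl := by
        apply map_pvReplF_of_not_mem
        intro kv hkv hne
        exact h.1 (hne ▸ List.mem_map_of_mem hkv)
      simp [pvModAt, pvReplF, htl]
    · simp [pvModAt, pvReplF, hk, ih h.2]

lemma pvStep_eq_map {bc : List (String × List (String × Bool))} (f : String) (b : Bool)
    (h : (bc.map Prod.fst).Nodup) :
    (if bc.any (fun kv => kv.1 == f) then pvModAt bc f b else bc) = bc.map (pvReplF f b) := by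
  by_cases hany : bc.any (fun kv => kv.1 == f)
  · rw [if_pos hany, pvModAt_eq_map f b h]
  · rw [if_neg hany]
    refine (map_pvReplF_of_not_mem ?_).symm
    intro kv hkv hne
    exact hany (List.any_eq_true.mpr ⟨kv, hkv, by simp [hne]⟩)

lemma keys_map_pvReplF (bc : List (String × List (String × Bool))) (f : String) (b : Bool) :
    (bc.map (pvReplF f b)).map Prod.fst = bc.map Prod.fst := by
  rw [List.map_map]
  exact List.map_congr_left (fun kv _ => pvReplF_fst f b kv)

lemma foldl_pvStep (L : List String) (b : Bool) (bc : List (String × List (String × Bool)))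
    (h : (bc.map Prod.fst).Nodup) :
    L.foldl (fun acc f => if acc.any (fun kv => kv.1 == f) then pvModAt acc f b else acc) bc
      = bc.map (fun kv => if kv.1 ∈ L then (kv.1, pvInsShow kv.2 b) else kv) := by
  induction L generalizing bc with
  | nil => simp
  | cons f L ih =>
    rw [List.foldl_cons, pvStep_eq_map f b h,
        ih (bc.map (pvReplF f b)) (by rw [keys_map_pvReplF]; exact h), List.map_map]
    apply List.map_congr_left
    intro kv _
    by_cases hf : kv.1 = f
    · by_cases hL : kv.1 ∈ L <;>
        simp [pvReplF, hf, pvInsShow_insShow]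
    · by_cases hL : kv.1 ∈ L <;>
        simp [pvReplF, hf, hL, List.mem_cons]

lemma lookup_mem {α β : Type} [BEq α] [LawfulBEq α] {l : List (α × β)} {k : α} {v : β}
    (h : List.lookup k l = some v) : (k, v) ∈ l := by
  induction l with
  | nil => simp [List.lookup] at h
  | cons hd tl ih =>
    obtain ⟨k', v'⟩ := hd
    rw [List.lookup_cons] at h
    split at h
    · rename_i hk
      cases eq_of_beq hk
      cases h
      exact List.mem_cons_self
    · exact List.mem_cons_of_mem _ (ih h)

set_option maxRecDepth 16384 in
lemma pvShownBy_keys : pvShownBy.map Prod.fst = pvAllDyn := by decide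

set_option maxRecDepth 16384 in
lemma pvShownBy_vals_actions : ∀ p ∈ pvShownBy, ∀ a ∈ p.2, a ∈ pvFieldMap.map Prod.fst := by decide

set_option maxRecDepth 16384 in
lemma pvFieldMap_subset_allDyn : ∀ p ∈ pvFieldMap, ∀ x ∈ p.2, x ∈ pvAllDyn := by decide

-- the inversion is correct: field f is in action a's list iff a is in f's shown_by list
set_option maxRecDepth 16384 in
lemma pvInv_correct : ∀ pa ∈ pvFieldMap, ∀ pf ∈ pvShownBy, (pf.1 ∈ pa.2 ↔ pa.1 ∈ pf.2) := by decide

lemma lookup_isSome_iff {α β : Type} [BEq α] [LawfulBEq α] (l : List (α × β)) (k : α) :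
    (List.lookup k l).isSome ↔ k ∈ l.map Prod.fst := by
  induction l with
  | nil => simp [List.lookup]
  | cons hd tl ih =>
    obtain ⟨k', v'⟩ := hd
    rw [List.lookup_cons]
    by_cases hk : k = k'
    · simp [hk]
    · have hb : (k == k') = false := by simp [hk]
      simp only [hb]
      rw [ih]
      simp
      exact fun h => absurd h hk

lemma lookup_none_of_not_mem {α β : Type} [BEq α] [LawfulBEq α] {l : List (α × β)} {k : α}
    (h : k ∉ l.map Prod.fst) : List.lookup k l = none := by
  cases hl : List.lookup k l with
  | none => rfl
  | some v => exact absurd ((lookup_isSome_iff l k).mp (by simp [hl])) h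

-- the per-entry functions of the two normal forms agree
lemma entry_eq (sel : List String) (kv : String × List (String × Bool)) :
    (let tgt : List String :=
        if sel.length = 1 ∧ (List.lookup (sel.headD "") pvFieldMap).isSome then
          (List.lookup (sel.headD "") pvFieldMap).getD [] else []
     if kv.1 ∈ pvAllDyn then (kv.1, pvInsShow kv.2 (decide (kv.1 ∈ tgt))) else kv)
      = match List.lookup kv.1 pvShownBy with
        | some acts => (kv.1, pvInsShow kv.2
            (pvActIn (if sel.length = 1 then some (sel.headD "") else none) acts))
        | none => kv := by
  by_cases hdyn : kv.1 ∈ pvAllDyn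
  · obtain ⟨acts, hacts⟩ := Option.isSome_iff_exists.mp
      ((lookup_isSome_iff pvShownBy kv.1).mpr (pvShownBy_keys ▸ hdyn))
    have hmemSB : (kv.1, acts) ∈ pvShownBy := lookup_mem hacts
    by_cases hlen : sel.length = 1
    · set a := sel.headD "" with ha
      cases hfm : List.lookup a pvFieldMap with
      | some l =>
        have hmemFM : (a, l) ∈ pvFieldMap := lookup_mem hfm
        have hiff := pvInv_correct (a, l) hmemFM (kv.1, acts) hmemSB
        simp [hacts, hdyn, hlen, pvActIn]
        exact congrArg (pvInsShow kv.2) (decide_eq_decide.mpr hiff)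
      | none =>
        have hnotact : a ∉ pvFieldMap.map Prod.fst := by
          intro hmem
          exact absurd ((lookup_isSome_iff pvFieldMap a).mpr hmem) (by simp [hfm])
        have hnotin : a ∉ acts := fun h => hnotact (pvShownBy_vals_actions (kv.1, acts) hmemSB a h)
        simp [hacts, hdyn, hlen, pvActIn, hnotin]
    · simp [hacts, hdyn, hlen, pvActIn]
  · have : kv.1 ∉ pvShownBy.map Prod.fst := pvShownBy_keys ▸ hdyn
    simp [lookup_none_of_not_mem this, hdyn]

lemma keys_map_showF (bc : List (String × List (String × Bool))) (L : List String) (b : Bool) :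
    (bc.map (fun kv => if kv.1 ∈ L then (kv.1, pvInsShow kv.2 b) else kv)).map Prod.fst
      = bc.map Prod.fst := by
  rw [List.map_map]
  apply List.map_congr_left
  intro kv _
  by_cases h : kv.1 ∈ L <;> simp [h]

lemma map_showF_comp (bc : List (String × List (String × Bool))) (tgt : List String)
    (htsub : ∀ x ∈ tgt, x ∈ pvAllDyn) :
    ((bc.map (fun kv => if kv.1 ∈ pvAllDyn then (kv.1, pvInsShow kv.2 false) else kv)).map
        (fun kv => if kv.1 ∈ tgt then (kv.1, pvInsShow kv.2 true) else kv))
      = bc.map (fun kv =>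
          if kv.1 ∈ pvAllDyn then (kv.1, pvInsShow kv.2 (decide (kv.1 ∈ tgt))) else kv) := by
  rw [List.map_map]
  apply List.map_congr_left
  intro kv _
  by_cases hD : kv.1 ∈ pvAllDyn
  · by_cases hT : kv.1 ∈ tgt <;> simp [hD, hT, pvInsShow_insShow]
  · have hT : kv.1 ∉ tgt := fun h => hD (htsub _ h)
    simp [hD, hT]

-- ===== VERDICT (by name: the statement is the Claim_ definition above) =====
theorem update_build_config_spec : Claim_equal_update_build_config := by
  intro bc fv fn _hdom hpre
  unfold Spec_update_build_config
  by_cases hfn : fn = some "action"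
  · subst hfn
    have hnd : (bc.map Prod.fst).Nodup := hpre.1
    show (if (fv.map (fun a => (List.lookup "name" a).getD "")).length = 1 ∧
            (List.lookup ((fv.map (fun a => (List.lookup "name" a).getD "")).headD "") pvFieldMap).isSome then
          ((List.lookup ((fv.map (fun a => (List.lookup "name" a).getD "")).headD "") pvFieldMap).getD []).foldl
            (fun acc f => if acc.any (fun kv => kv.1 == f) then pvModAt acc f true else acc)
            (pvAllDyn.foldl
              (fun acc f => if acc.any (fun kv => kv.1 == f) then pvModAt acc f false else acc) bc)
        else
          pvAllDyn.foldl
            (fun acc f => if acc.any (fun kv => kv.1 == f) then pvModAt acc f false else acc) bc)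
      = bc.map (fun kv =>
          match List.lookup kv.1 pvShownBy with
          | some acts => (kv.1, pvInsShow kv.2
              (pvActIn (if (fv.map (fun a => (List.lookup "name" a).getD "")).length = 1 then
                          some ((fv.map (fun a => (List.lookup "name" a).getD "")).headD "")
                        else none) acts))
          | none => kv)
    set sel := fv.map (fun a => (List.lookup "name" a).getD "") with hsel
    set m := List.lookup (sel.headD "") pvFieldMap with hm
    set tgt : List String := if sel.length = 1 ∧ m.isSome then m.getD [] else [] with htgt
    have htsub : ∀ x ∈ tgt, x ∈ pvAllDyn := by
      intro x hx
      rw [htgt] at hx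
      split at hx
      · rename_i hc
        obtain ⟨l, hl⟩ := Option.isSome_iff_exists.mp hc.2
        rw [hl] at hx
        exact pvFieldMap_subset_allDyn (sel.headD "", l) (lookup_mem hl) x hx
      · simp at hx
    have hA :
        (if sel.length = 1 ∧ m.isSome then
            (m.getD []).foldl
              (fun acc f => if acc.any (fun kv => kv.1 == f) then pvModAt acc f true else acc)
              (pvAllDyn.foldl
                (fun acc f => if acc.any (fun kv => kv.1 == f) then pvModAt acc f false else acc) bc)
          else
            pvAllDyn.foldl
              (fun acc f => if acc.any (fun kv => kv.1 == f) then pvModAt acc f false else acc) bc)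
        = tgt.foldl (fun acc f => if acc.any (fun kv => kv.1 == f) then pvModAt acc f true else acc)
            (pvAllDyn.foldl
              (fun acc f => if acc.any (fun kv => kv.1 == f) then pvModAt acc f false else acc) bc) := by
      rw [htgt]; split <;> simp
    rw [hA, foldl_pvStep pvAllDyn false bc hnd,
        foldl_pvStep tgt true _ (by rw [keys_map_showF]; exact hnd),
        map_showF_comp bc tgt htsub]
    apply List.map_congr_left
    intro kv _
    have := entry_eq sel kv
    simp only [← hsel, ← hm, ← htgt] at this ⊢
    exact this
  · have h1 : update_build_config bc fv fn = bc := by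
      unfold update_build_config
      rw [if_pos (show fn ≠ some "action" from hfn)]
    have h2 : update_build_config_alt bc fv fn = bc := by
      unfold update_build_config_alt
      rw [if_pos (show fn ≠ some "action" from hfn)]
    rw [h1, h2]
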